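-- pv_equiv track=rewrite | github.com/Protonk/BIDDER | experiments/acm-flow/phase1_destroyers.py | n_type
-- ===== SOURCE A (Python) =====
-- def n_type(n):
--     """Family-geometry classifier of n via prime factorization."""
--     if n < 2:
--         return 'unit'
--     factors = {}
--     r = n
--     p = 2
--     while p * p <= r:
--         while r % p == 0:
--             factors[p] = factors.get(p, 0) + 1
--             r //= p
--         p += 1
--     if r > 1:
--         factors[r] = factors.get(r, 0) + 1
--     omega = len(factors)
--     Omega = sum(factors.values())
--     if omega == 1 and Omega == 1:
--         return 'prime'
--     if omega == 1 and Omega > 1: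
--         return 'prime_power'
--     if omega > 1:
--         return 'multi_prime'
--     return 'unit'
-- ===== SOURCE B (Python) =====
-- def n_type(n):
--     """Family-geometry classifier of n via prime factorization."""
--     if n < 2:
--         return 'unit'
--     # find the smallest prime factor of n by trial division up to sqrt(n)
--     p = 2
--     while p * p <= n and n % p != 0:
--         p += 1
--     if p * p > n:
--         return 'prime'  # no divisor up to sqrt(n): n itself is prime
--     # divide the smallest prime factor out of n
--     r = n
--     while r % p == 0:
--         r //= p
--     # r == 1 means n is a power p**e with e >= 2; otherwise a second prime exists
--     return 'prime_power' if r == 1 else 'multi_prime'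
-- ===== Notes on version B (the rewrite author's own statement) =====
-- stated objective: simpler
-- what changed: B finds only the smallest prime factor, divides it out, and classifies from whether that prime's power exhausts n (early exit), instead of A's full factorization into a dict followed by omega/Omega counting.
import Mathlib
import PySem

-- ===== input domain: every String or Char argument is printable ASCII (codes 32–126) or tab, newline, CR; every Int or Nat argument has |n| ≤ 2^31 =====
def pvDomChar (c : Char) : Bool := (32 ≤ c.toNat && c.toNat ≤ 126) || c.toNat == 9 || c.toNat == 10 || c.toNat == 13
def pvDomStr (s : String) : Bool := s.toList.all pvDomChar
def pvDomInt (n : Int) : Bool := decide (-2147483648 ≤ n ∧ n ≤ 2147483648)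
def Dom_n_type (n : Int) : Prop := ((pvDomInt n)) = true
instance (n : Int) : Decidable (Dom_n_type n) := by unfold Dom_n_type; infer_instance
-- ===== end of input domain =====

-- B replaces A's full trial-division factorization (dict of exponents, then ω/Ω counts) by:
-- find the smallest prime factor, divide it out, and decide from the residue alone
-- (early exit, no dict) — objective: simpler.

-- ===== PORT A =====
-- small hand-written measure lemmas cited by the decreasing_by blocks of both ports
-- (kept term-small on purpose: the loops' termination proofs live inside the ports)
theorem measure_div (p r : Int) (hp : 2 ≤ p) (hr : 0 < r) :
    (PySem.Int.floordiv r p).toNat < r.toNat := by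
  have hp0 : (0:Int) < p := lt_of_lt_of_le two_pos hp
  have hlt : r / p < r :=
    Int.ediv_lt_of_lt_mul hp0 ((lt_mul_iff_one_lt_right hr).2 (lt_of_lt_of_le one_lt_two hp))
  rw [PySem.Int.floordiv_eq_ediv_of_pos hp0]
  exact (Int.toNat_lt_toNat hr).2 hlt

theorem fd_le (p r : Int) (hp : 2 ≤ p) (hr : 0 < r) : PySem.Int.floordiv r p ≤ r :=
  le_of_lt ((Int.toNat_lt_toNat hr).1 (measure_div p r hp hr))

theorem measure_outer (p r s : Int) (hs : s ≤ r) (hg : p * p ≤ r) :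
    (s + 2 - (p + 1)).toNat < (r + 2 - p).toNat := by
  have hpr : p ≤ r + 1 := by
    rcases le_or_gt p 1 with h | h
    · exact le_trans h (le_add_of_nonneg_left (le_trans (mul_self_nonneg p) hg))
    · exact le_trans (le_trans ((le_mul_iff_one_le_left (lt_trans one_pos h)).2 (le_of_lt h)) hg)
        (le_of_lt (lt_add_one r))
  have hpos : 0 < r + 2 - p := by linarith
  exact (Int.toNat_lt_toNat hpos).2 (by linarith)


-- inner 'while r % p == 0' loop of A; the extra conjuncts 2 ≤ p ∧ 0 < r only make the
-- recursion total (they hold at every call A's code reaches: p starts at 2, r stays ≥ 1)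
def aInner (p r : Int) (d : PySem.Dict Int Int) : Int × PySem.Dict Int Int :=
  if h : 2 ≤ p ∧ 0 < r ∧ PySem.Int.mod r p = 0 then
    aInner p (PySem.Int.floordiv r p) (d.insert p (d.getD p 0 + 1))
  else (r, d)
termination_by r.toNat
decreasing_by exact measure_div p r h.1 h.2.1


-- r only shrinks through the inner loop (needed for aOuter's termination; cited in decreasing_by)
theorem aInner_fst_le (p r : Int) (d : PySem.Dict Int Int) : (aInner p r d).1 ≤ r := by
  induction r, d using aInner.induct p with
  | case1 r d h ih =>
    rw [aInner, dif_pos h]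
    exact le_trans ih (fd_le p r h.1 h.2.1)
  | case2 r d h => rw [aInner, dif_neg h]

-- outer 'while p * p <= r' loop of A
def aOuter (p r : Int) (d : PySem.Dict Int Int) : Int × PySem.Dict Int Int :=
  if h : p * p ≤ r then
    let s := aInner p r d
    aOuter (p + 1) s.1 s.2
  else (r, d)
termination_by (r + 2 - p).toNat
decreasing_by exact measure_outer p r _ (aInner_fst_le p r d) h

-- 'if r > 1: factors[r] = factors.get(r, 0) + 1'
def aFinish (r : Int) (d : PySem.Dict Int Int) : PySem.Dict Int Int :=
  if 1 < r then d.insert r (d.getD r 0 + 1) else d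

-- 'omega = len(factors); Omega = sum(factors.values())' and the final if-chain
def aClassify (d : PySem.Dict Int Int) : String :=
  if d.size = 1 ∧ d.values.sum = 1 then "prime"
  else if d.size = 1 ∧ 1 < d.values.sum then "prime_power"
  else if 1 < d.size then "multi_prime"
  else "unit"

def n_type (n : Int) : String :=
  if n < 2 then "unit"
  else
    let s := aOuter 2 n PySem.Dict.empty
    aClassify (aFinish s.1 s.2)

-- ===== PORT B =====
-- 'while p * p <= n and n % p != 0: p += 1'
def bFind (p n : Int) : Int :=
  if h : p * p ≤ n ∧ PySem.Int.mod n p ≠ 0 then bFind (p + 1) n else p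
termination_by (n + 2 - p).toNat
decreasing_by exact measure_outer p n n le_rfl h.1

-- 'while r % p == 0: r //= p'; the conjuncts 2 ≤ p ∧ 0 < r only make the recursion total
def bDivOut (p r : Int) : Int :=
  if h : 2 ≤ p ∧ 0 < r ∧ PySem.Int.mod r p = 0 then bDivOut p (PySem.Int.floordiv r p) else r
termination_by r.toNat
decreasing_by exact measure_div p r h.1 h.2.1

def n_type_alt (n : Int) : String :=
  if n < 2 then "unit"
  else
    let p := bFind 2 n
    if n < p * p then "prime"
    else if bDivOut p n = 1 then "prime_power"
    else "multi_prime"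

-- ===== PRECONDITION & SPEC =====
def Spec_n_type (n : Int) (out : String) : Prop := out = n_type_alt n
instance (n : Int) (out : String) : Decidable (Spec_n_type n out) := by unfold Spec_n_type; infer_instance

-- ===== CLAIM (what is proved, stated in full; the proofs are below) =====
def Claim_equal_n_type : Prop := ∀ (n : Int), Dom_n_type n → Spec_n_type n (n_type n)

-- ===== LEMMAS AND PROOFS =====

-- step/stop unfoldings of the loops
theorem aOuter_stop (p r : Int) (d : PySem.Dict Int Int) (h : ¬ p * p ≤ r) :
    aOuter p r d = (r, d) := by rw [aOuter, dif_neg h]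

theorem aOuter_step (p r : Int) (d : PySem.Dict Int Int) (h : p * p ≤ r) :
    aOuter p r d = aOuter (p + 1) (aInner p r d).1 (aInner p r d).2 := by
  rw [aOuter, dif_pos h]

-- A's inner loop drives r exactly as B's divide-out loop does
theorem aInner_fst_eq (p r : Int) (d : PySem.Dict Int Int) :
    (aInner p r d).1 = bDivOut p r := by
  induction r, d using aInner.induct p with
  | case1 r d h ih => rw [aInner, dif_pos h, bDivOut, dif_pos h, ih]
  | case2 r d h => rw [aInner, dif_neg h, bDivOut, dif_neg h]

-- the exact division step: r = (r // p) * p when p divides r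
theorem fd_mul (p r : Int) (hm : PySem.Int.mod r p = 0) :
    PySem.Int.floordiv r p * p = r := by
  have := PySem.Int.floordiv_mul_add_mod r p
  omega

theorem fd_pos (p r : Int) (hp : 2 ≤ p) (hr : 0 < r) (hm : PySem.Int.mod r p = 0) :
    0 < PySem.Int.floordiv r p := by
  have hq := fd_mul p r hm
  nlinarith [hq]

theorem bDivOut_pos (p r : Int) (h : 0 < r) : 0 < bDivOut p r := by
  induction r using bDivOut.induct p with
  | case1 r hg ih =>
    rw [bDivOut, dif_pos hg]
    exact ih (fd_pos p r hg.1 hg.2.1 hg.2.2)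
  | case2 r hg => rw [bDivOut, dif_neg hg]; exact h

theorem bDivOut_dvd (p r : Int) : bDivOut p r ∣ r := by
  induction r using bDivOut.induct p with
  | case1 r hg ih =>
    rw [bDivOut, dif_pos hg]
    have hq := fd_mul p r hg.2.2
    exact dvd_trans ih ⟨p, hq.symm⟩
  | case2 r hg => rw [bDivOut, dif_neg hg]

theorem bDivOut_le (p r : Int) (h : 0 < r) : bDivOut p r ≤ r :=
  Int.le_of_dvd h (bDivOut_dvd p r)

theorem bDivOut_not_dvd (p r : Int) (hp : 2 ≤ p) (hr : 0 < r) :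
    ¬ (p ∣ bDivOut p r) := by
  induction r using bDivOut.induct p with
  | case1 r hg ih =>
    rw [bDivOut, dif_pos hg]
    exact ih (fd_pos p r hg.1 hg.2.1 hg.2.2)
  | case2 r hg =>
    rw [bDivOut, dif_neg hg]
    intro hdvd
    exact hg ⟨hp, hr, (PySem.Int.mod_eq_zero_iff_dvd r p).2 hdvd⟩

-- if the divide-out loop reached 1 from r > 1 it must have divided at least once
theorem bDivOut_first_step (p r : Int) (hp : 2 ≤ p) (hr : 1 < r)
    (h1 : bDivOut p r = 1) : PySem.Int.mod r p = 0 := by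
  by_contra hm
  rw [bDivOut, dif_neg (by intro hg; exact hm hg.2.2)] at h1
  omega

-- the inner loop never changes the key set once p is a key
theorem aInner_keys_of_mem (p : Int) : ∀ (r : Int) (d : PySem.Dict Int Int),
    p ∈ d.keys → ((aInner p r d).2).keys = d.keys := by
  intro r d
  induction r, d using aInner.induct p with
  | case1 r d h ih =>
    intro hmem
    rw [aInner, dif_pos h]
    have hc : d.contains p = true := (PySem.Dict.contains_iff_mem_keys d p).2 hmem
    rw [ih (by rw [PySem.Dict.keys_insert_of_contains d _ hc]; exact hmem),
      PySem.Dict.keys_insert_of_contains d _ hc]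
  | case2 r d h => intro _; rw [aInner, dif_neg h]

-- on a singleton dict {p: c} the inner loop returns (bDivOut p r, {p: m}) with c ≤ m
theorem aInner_single (p : Int) (hp : 2 ≤ p) : ∀ (N : Nat) (r c : Int), r.toNat ≤ N →
    ∃ m, c ≤ m ∧ aInner p r (PySem.Dict.mk [(p, c)]) = (bDivOut p r, PySem.Dict.mk [(p, m)]) := by
  intro N
  induction N with
  | zero =>
    intro r c hN
    refine ⟨c, le_refl c, ?_⟩
    have hr : ¬ (2 ≤ p ∧ 0 < r ∧ PySem.Int.mod r p = 0) := by
      intro hg; omega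
    rw [aInner, dif_neg hr, bDivOut, dif_neg hr]
  | succ N ih =>
    intro r c hN
    by_cases hg : 2 ≤ p ∧ 0 < r ∧ PySem.Int.mod r p = 0
    · have hins : (PySem.Dict.mk [(p, c)] : PySem.Dict Int Int).insert p
          ((PySem.Dict.mk [(p, c)] : PySem.Dict Int Int).getD p 0 + 1) = PySem.Dict.mk [(p, c + 1)] := by
        simp [PySem.Dict.insert, PySem.Dict.contains, PySem.Dict.getD, PySem.Dict.get?]
      have hlt : (PySem.Int.floordiv r p).toNat ≤ N := by
        rw [PySem.Int.floordiv_eq_ediv_of_pos (by omega : (0:Int) < p)]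
        have ha : r / p < r := by
          apply Int.ediv_lt_of_lt_mul (by omega)
          nlinarith [hg.2.1, hg.1]
        omega
      obtain ⟨m, hm, heq⟩ := ih (PySem.Int.floordiv r p) (c + 1) hlt
      refine ⟨m, by omega, ?_⟩
      rw [aInner, dif_pos hg, hins, heq]
      conv_rhs => rw [bDivOut, dif_pos hg]
    · exact ⟨c, le_refl c, by rw [aInner, dif_neg hg, bDivOut, dif_neg hg]⟩

theorem size_eq_keys_length (d : PySem.Dict Int Int) : d.size = d.keys.length := by
  simp [PySem.Dict.size, PySem.Dict.keys]

-- appending a fresh key r to the dict grows it by exactly one entry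
theorem aFinish_fresh (r : Int) (d : PySem.Dict Int Int) (hr : 1 < r) (hmem : r ∉ d.keys) :
    (aFinish r d).size = d.keys.length + 1 := by
  have hc : d.contains r = false := by
    cases hcb : d.contains r
    · rfl
    · exact absurd ((PySem.Dict.contains_iff_mem_keys d r).1 hcb) hmem
  rw [aFinish, if_pos hr, size_eq_keys_length, PySem.Dict.keys_insert_of_not_contains d _ hc]
  simp

-- when the outer loop stops with r > 1 untouched, 'if r > 1' adds r as a fresh key
theorem grow_stop (p r : Int) (d : PySem.Dict Int Int) (hr : 1 < r) (hg : ¬ p * p ≤ r)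
    (hdiv : ∀ k, 2 ≤ k → k < p → ¬ (k ∣ r)) (hkeys : ∀ k ∈ d.keys, 2 ≤ k ∧ k < p) :
    d.keys.length + 1 ≤ (aFinish (aOuter p r d).1 (aOuter p r d).2).size := by
  rw [aOuter_stop p r d hg]
  have hmem : r ∉ d.keys := fun hin => hdiv r (by omega) ((hkeys r hin).2) dvd_rfl
  rw [aFinish_fresh r d hr hmem]

-- once r > 1 still has no factor below p, the rest of A's run adds at least one key
theorem grow (N : Nat) : ∀ (p r : Int) (d : PySem.Dict Int Int), (r + 2 - p).toNat ≤ N →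
    2 ≤ p → 1 < r → (∀ k, 2 ≤ k → k < p → ¬ (k ∣ r)) → (∀ k ∈ d.keys, 2 ≤ k ∧ k < p) →
    d.keys.length + 1 ≤ (aFinish (aOuter p r d).1 (aOuter p r d).2).size := by
  induction N with
  | zero =>
    intro p r d hN hp hr hdiv hkeys
    have hg : ¬ p * p ≤ r := by
      intro hgg
      have hpp : p ≤ p * p := by nlinarith
      omega
    exact grow_stop p r d hr hg hdiv hkeys
  | succ N ih =>
    intro p r d hN hp hr hdiv hkeys
    by_cases hg : p * p ≤ r
    · have hple : p ≤ r := by nlinarith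
      by_cases hm : PySem.Int.mod r p = 0
      · -- p divides r: the inner loop fires, key p is appended, then recurse
        have hr0 : (0:Int) < r := by omega
        have hfresh : d.contains p = false := by
          cases hcb : d.contains p
          · rfl
          · exact absurd (le_refl p) (not_le.2 ((hkeys p ((PySem.Dict.contains_iff_mem_keys d p).1 hcb)).2))
        rw [aOuter_step p r d hg, aInner, dif_pos ⟨hp, hr0, hm⟩]
        set d2 := d.insert p (d.getD p 0 + 1) with hd2
        have hk2 : d2.keys = d.keys ++ [p] := PySem.Dict.keys_insert_of_not_contains d _ hfresh
        have hpm : p ∈ d2.keys := by rw [hk2]; simp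
        have hkeq : ((aInner p (PySem.Int.floordiv r p) d2).2).keys = d.keys ++ [p] := by
          rw [aInner_keys_of_mem p _ d2 hpm, hk2]
        have hbd : bDivOut p r = bDivOut p (PySem.Int.floordiv r p) := by
          conv_lhs => rw [bDivOut, dif_pos ⟨hp, hr0, hm⟩]
        have hfst : (aInner p (PySem.Int.floordiv r p) d2).1 = bDivOut p r := by
          rw [aInner_fst_eq, hbd]
        rw [hfst]
        set e := (aInner p (PySem.Int.floordiv r p) d2).2 with he
        set r1 := bDivOut p r with hr1def
        have hr1pos : 0 < r1 := bDivOut_pos p r hr0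
        have hr1le : r1 ≤ r := bDivOut_le p r hr0
        by_cases h1 : r1 = 1
        · rw [h1, aOuter_stop (p + 1) 1 e (by nlinarith)]
          rw [aFinish, if_neg (by omega), size_eq_keys_length, hkeq]
          simp
        · have hr1gt : 1 < r1 := by omega
          have hstep := ih (p + 1) r1 e (by omega) (by omega) hr1gt
            (by
              intro k hk2' hklt hkdvd
              rcases lt_or_eq_of_le (by omega : k ≤ p) with hlt | heq
              · exact hdiv k hk2' hlt (dvd_trans hkdvd (bDivOut_dvd p r))
              · rw [heq] at hkdvd
                exact bDivOut_not_dvd p r hp hr0 hkdvd)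
            (by
              intro k hkin
              rw [hkeq] at hkin
              rcases List.mem_append.1 hkin with hkin | hkin
              · have := hkeys k hkin; omega
              · simp at hkin; omega)
          rw [hkeq] at hstep
          simp only [List.length_append, List.length_singleton] at hstep
          omega
      · -- p does not divide r: the inner loop is a no-op
        rw [aOuter_step p r d hg, aInner, dif_neg (fun hgg => hm hgg.2.2)]
        exact ih (p + 1) r d (by omega) (by omega) hr
          (by
            intro k hk2' hklt hkdvd
            rcases lt_or_eq_of_le (by omega : k ≤ p) with hlt | heq
            · exact hdiv k hk2' hlt hkdvd
            · rw [heq] at hkdvd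
              exact hm ((PySem.Int.mod_eq_zero_iff_dvd r p).2 hkdvd))
          (fun k hkin => by have := hkeys k hkin; omega)
    · exact grow_stop p r d hr hg hdiv hkeys

-- literal dict steps used by the main proof
theorem ins_empty (p : Int) :
    (PySem.Dict.empty : PySem.Dict Int Int).insert p
      ((PySem.Dict.empty : PySem.Dict Int Int).getD p 0 + 1) = PySem.Dict.mk [(p, 1)] := by
  simp [PySem.Dict.insert, PySem.Dict.contains, PySem.Dict.getD, PySem.Dict.get?,
    PySem.Dict.empty]

theorem ins_one (p : Int) :
    (PySem.Dict.mk [(p, 1)] : PySem.Dict Int Int).insert p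
      ((PySem.Dict.mk [(p, 1)] : PySem.Dict Int Int).getD p 0 + 1) = PySem.Dict.mk [(p, 2)] := by
  simp [PySem.Dict.insert, PySem.Dict.contains, PySem.Dict.getD, PySem.Dict.get?]

-- when no candidate up to √n divides n, A ends with the single entry {n: 1} and B says prime
theorem main_stop (n p : Int) (hn : 2 ≤ n) (hp : 2 ≤ p) (hg : ¬ p * p ≤ n) :
    aClassify (aFinish (aOuter p n PySem.Dict.empty).1 (aOuter p n PySem.Dict.empty).2) =
      (if n < bFind p n * bFind p n then "prime"
       else if bDivOut (bFind p n) n = 1 then "prime_power"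
       else "multi_prime") := by
  rw [bFind, dif_neg (fun hc => hg hc.1), if_pos (by omega), aOuter_stop p n _ hg,
    aFinish, if_pos (by omega : (1:Int) < n), ins_empty n]
  simp [aClassify, PySem.Dict.size, PySem.Dict.values]

theorem main_lemma : ∀ (N : Nat) (n p : Int), (n + 2 - p).toNat ≤ N → 2 ≤ n → 2 ≤ p →
    (∀ k, 2 ≤ k → k < p → ¬ (k ∣ n)) →
    aClassify (aFinish (aOuter p n PySem.Dict.empty).1 (aOuter p n PySem.Dict.empty).2) =
      (if n < bFind p n * bFind p n then "prime"
       else if bDivOut (bFind p n) n = 1 then "prime_power"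
       else "multi_prime") := by
  intro N
  induction N with
  | zero =>
    intro n p hN hn hp hdiv
    have hg : ¬ p * p ≤ n := by
      intro hgg
      have hpp : p ≤ p * p := by nlinarith
      omega
    exact main_stop n p hn hp hg
  | succ N ih =>
    intro n p hN hn hp hdiv
    by_cases hg : p * p ≤ n
    · have hple : p ≤ n := by nlinarith
      by_cases hm : PySem.Int.mod n p = 0
      · -- p is the smallest factor of n: B stops searching here, A divides p out
        have hn0 : (0:Int) < n := by omega
        -- right side: bFind stops at p and p*p ≤ n
        rw [bFind, dif_neg (fun hc => hc.2 hm), if_neg (not_lt.2 hg)]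
        -- left side: unfold the first inner division
        rw [aOuter_step p n _ hg, aInner, dif_pos ⟨hp, hn0, hm⟩, ins_empty p]
        have hq := fd_mul p n hm
        have hqpos := fd_pos p n hp hn0 hm
        have hbd : bDivOut p n = bDivOut p (PySem.Int.floordiv n p) := by
          conv_lhs => rw [bDivOut, dif_pos ⟨hp, hn0, hm⟩]
        by_cases h1 : bDivOut p n = 1
        · -- n is a power of p: the exponent reaches at least 2
          rw [if_pos h1]
          have hq1 : 1 < PySem.Int.floordiv n p := by
            rcases lt_or_eq_of_le (by omega : 1 ≤ PySem.Int.floordiv n p) with h | h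
            · exact h
            · exfalso; rw [← h] at hq; nlinarith
          have hm2 : PySem.Int.mod (PySem.Int.floordiv n p) p = 0 :=
            bDivOut_first_step p _ hp hq1 (hbd ▸ h1)
          rw [aInner, dif_pos ⟨hp, by omega, hm2⟩, ins_one p]
          obtain ⟨m, hmle, heq⟩ :=
            aInner_single p hp (PySem.Int.floordiv (PySem.Int.floordiv n p) p).toNat
              (PySem.Int.floordiv (PySem.Int.floordiv n p) p) 2 le_rfl
          rw [heq]
          have hbd2 : bDivOut p (PySem.Int.floordiv (PySem.Int.floordiv n p) p) = 1 := by
            have : bDivOut p (PySem.Int.floordiv n p) = 1 := hbd ▸ h1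
            rw [bDivOut, dif_pos ⟨hp, by omega, hm2⟩] at this
            exact this
          rw [hbd2, aOuter_stop (p + 1) 1 _ (by nlinarith), aFinish, if_neg (by omega)]
          simp [aClassify, PySem.Dict.size, PySem.Dict.values,
            (show ¬ m = 1 by omega), (show 1 < m by omega)]
        · -- a second prime remains in the residue: A must end with ≥ 2 distinct keys
          rw [if_neg h1]
          obtain ⟨m, hmle, heq⟩ :=
            aInner_single p hp (PySem.Int.floordiv n p).toNat (PySem.Int.floordiv n p) 1 le_rfl
          have hfst : (aInner p (PySem.Int.floordiv n p) (PySem.Dict.mk [(p, 1)])).1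
              = bDivOut p n := by rw [heq, ← hbd]
          have hsnd : (aInner p (PySem.Int.floordiv n p) (PySem.Dict.mk [(p, 1)])).2
              = PySem.Dict.mk [(p, m)] := by rw [heq]
          rw [hfst, hsnd]
          have hr1pos : 0 < bDivOut p n := bDivOut_pos p n hn0
          have hr1gt : 1 < bDivOut p n := by omega
          have hgrow := grow (bDivOut p n + 2 - (p + 1)).toNat (p + 1) (bDivOut p n)
            (PySem.Dict.mk [(p, m)]) le_rfl (by omega) hr1gt
            (by
              intro k hk2 hklt hkdvd
              rcases lt_or_eq_of_le (by omega : k ≤ p) with hlt | hekp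
              · exact hdiv k hk2 hlt (dvd_trans hkdvd (bDivOut_dvd p n))
              · rw [hekp] at hkdvd
                exact bDivOut_not_dvd p n hp hn0 hkdvd)
            (by intro k hkin; simp [PySem.Dict.keys] at hkin; omega)
          simp only [PySem.Dict.keys, List.map_cons, List.map_nil, List.length_cons,
            List.length_nil] at hgrow
          rw [aClassify, if_neg (fun hc => by omega), if_neg (fun hc => by omega),
            if_pos (by omega)]
      · -- p divides neither: both loops move on to p + 1
        rw [aOuter_step p n _ hg, aInner, dif_neg (fun hgg => hm hgg.2.2),
          bFind, dif_pos ⟨hg, hm⟩]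
        exact ih n (p + 1) (by omega) hn (by omega)
          (by
            intro k hk2 hklt hkdvd
            rcases lt_or_eq_of_le (by omega : k ≤ p) with hlt | hekp
            · exact hdiv k hk2 hlt hkdvd
            · rw [hekp] at hkdvd
              exact hm ((PySem.Int.mod_eq_zero_iff_dvd n p).2 hkdvd))
    · exact main_stop n p hn hp hg

-- ===== VERDICT (by name: the statement is the Claim_ definition above) =====
theorem n_type_spec : Claim_equal_n_type := by
  intro n _
  unfold Spec_n_type n_type n_type_alt
  by_cases h2 : n < 2
  · simp [h2]
  · simp only [h2, if_false]
    exact main_lemma (n + 2 - 2).toNat n 2 (le_refl _) (by omega) (by omega)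
      (fun k hk hk2 _ => by omega)
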